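-- pv_equiv track=rewrite | github.com/AdityaGuzzu/BusinessSimulation | PythonCode/listchecker.py | white_double_rent_checker
-- ===== SOURCE A (Python) =====
-- def white_double_rent_checker(big_lst, small_lst):
--     statement = False
--     return_value = []
--     for i in small_lst:
--         for j in big_lst:
--             if j == i:
--                 return_value.append(1)
--     if len(return_value) == 2:
--         statement = True
--     return statement
-- ===== SOURCE B (Python) =====
-- def white_double_rent_checker(big_lst, small_lst):
--     cb = {}
--     for j in big_lst:
--         cb[j] = cb.get(j, 0) + 1
--     total = 0
--     for i in small_lst:
--         total += cb.get(i, 0)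
--     return total == 2
-- ===== Notes on version B (the rewrite author's own statement) =====
-- stated objective: faster
-- what changed: Replaces the nested scan of big_lst per small_lst element with a frequency table of big_lst built once, then a single pass over small_lst summing matched counts.
import Mathlib
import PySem

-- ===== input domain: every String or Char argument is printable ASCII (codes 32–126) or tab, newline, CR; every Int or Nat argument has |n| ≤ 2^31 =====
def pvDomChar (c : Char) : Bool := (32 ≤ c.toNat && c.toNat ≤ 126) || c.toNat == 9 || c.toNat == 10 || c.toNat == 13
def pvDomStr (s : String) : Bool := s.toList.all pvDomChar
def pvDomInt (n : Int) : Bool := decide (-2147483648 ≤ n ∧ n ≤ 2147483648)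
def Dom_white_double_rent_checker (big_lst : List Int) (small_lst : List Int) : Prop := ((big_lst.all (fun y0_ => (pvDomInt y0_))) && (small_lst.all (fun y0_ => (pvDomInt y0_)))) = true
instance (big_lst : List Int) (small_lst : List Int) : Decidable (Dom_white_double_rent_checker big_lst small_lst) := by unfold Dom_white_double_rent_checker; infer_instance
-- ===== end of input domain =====

-- B replaces A's nested scans with a frequency table of big_lst and one summing pass over small_lst (faster in a timing run).

-- ===== PORT A =====
-- nested loops appending 1 to return_value for every match, then len == 2
def white_double_rent_checker (big_lst : List Int) (small_lst : List Int) : Bool :=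
  let return_value : List Int :=
    small_lst.foldl (fun acc i =>
      big_lst.foldl (fun acc2 j => if j = i then acc2 ++ [(1 : Int)] else acc2) acc) []
  if return_value.length = 2 then true else false

-- ===== PORT B =====
-- build counter of big_lst (dict get-or-0 + insert), then sum lookups over small_lst
def white_double_rent_checker_alt (big_lst : List Int) (small_lst : List Int) : Bool :=
  let cb : PySem.Dict Int Int :=
    big_lst.foldl (fun d j => d.insert j (d.getD j 0 + 1)) PySem.Dict.empty
  let total : Int := small_lst.foldl (fun t i => t + cb.getD i 0) 0
  total == 2

-- ===== PRECONDITION & SPEC =====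
def Spec_white_double_rent_checker (big_lst : List Int) (small_lst : List Int) (out : Bool) : Prop := out = white_double_rent_checker_alt big_lst small_lst
instance (big_lst : List Int) (small_lst : List Int) (out : Bool) : Decidable (Spec_white_double_rent_checker big_lst small_lst out) := by unfold Spec_white_double_rent_checker; infer_instance

-- ===== CLAIM (what is proved, stated in full; the proofs are below) =====
def Claim_equal_white_double_rent_checker : Prop := ∀ (big_lst : List Int) (small_lst : List Int), Dom_white_double_rent_checker big_lst small_lst → Spec_white_double_rent_checker big_lst small_lst (white_double_rent_checker big_lst small_lst)

-- ===== LEMMAS AND PROOFS =====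
-- inner loop of A: appending one 1 per match adds count(big, i) to the length
theorem pv_inner_len (big : List Int) (i : Int) (acc : List Int) :
    (big.foldl (fun acc2 j => if j = i then acc2 ++ [(1 : Int)] else acc2) acc).length
      = acc.length + big.count i := by
  induction big generalizing acc with
  | nil => simp [List.count]
  | cons j rest ih =>
    simp only [List.foldl_cons]
    by_cases h : j = i
    · rw [if_pos h, ih]
      subst h
      simp [List.count_cons]
      omega
    · rw [if_neg h, ih]
      have : ¬ i = j := fun hh => h hh.symm
      simp [List.count_cons, this]
      omega

-- outer loop of A: the total length is the sum of per-element counts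
theorem pv_outer_len (big : List Int) (small : List Int) (acc : List Int) :
    (small.foldl (fun a i =>
        big.foldl (fun acc2 j => if j = i then acc2 ++ [(1 : Int)] else acc2) a) acc).length
      = acc.length + (small.map (fun i => big.count i)).sum := by
  induction small generalizing acc with
  | nil => simp
  | cons i rest ih =>
    simp only [List.foldl_cons, ih, pv_inner_len, List.map_cons, List.sum_cons]
    omega

-- B's summing loop over small_lst equals the same sum of counts, cast to Int
theorem pv_foldl_add_map (g : Int → Int) (l : List Int) (t : Int) :
    l.foldl (fun t i => t + g i) t = t + (l.map g).sum := by
  induction l generalizing t with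
  | nil => simp
  | cons i rest ih => simp [List.foldl, ih]; ring

theorem pv_b_total (big : List Int) (small : List Int) (t : Int) :
    small.foldl (fun t i =>
        t + (big.foldl (fun d j => d.insert j (d.getD j 0 + 1)) PySem.Dict.empty).getD i 0) t
      = t + ((small.map (fun i => (big.count i : Int))).sum) := by
  have h : ∀ i : Int, (big.foldl (fun d j => d.insert j (d.getD j 0 + 1)) PySem.Dict.empty).getD i 0
      = (big.count i : Int) := by
    intro i; simp [PySem.Dict.getD_foldl_insert_add_one]
  simp only [h]
  exact pv_foldl_add_map _ small t

-- the Nat-sum test of A and the Int-sum test of B agree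
theorem pv_cast_sum (big : List Int) (small : List Int) :
    ((small.map (fun i => (big.count i : Int))).sum)
      = (((small.map (fun i => big.count i)).sum : Nat) : Int) := by
  induction small with
  | nil => simp
  | cons i rest ih => simp [ih]

-- ===== VERDICT (by name: the statement is the Claim_ definition above) =====
theorem white_double_rent_checker_spec : Claim_equal_white_double_rent_checker := by
  intro big small _
  unfold Spec_white_double_rent_checker white_double_rent_checker white_double_rent_checker_alt
  simp only [pv_outer_len, pv_b_total, pv_cast_sum, List.length_nil, Nat.zero_add, Int.zero_add]
  by_cases h : (small.map (fun i => big.count i)).sum = 2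
  · rw [if_pos h, h]
    decide
  · have h2 : (((small.map (fun i => big.count i)).sum : Nat) : Int) ≠ 2 := by
      exact_mod_cast h
    rw [if_neg h]
    exact (beq_eq_false_iff_ne.mpr h2).symm
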